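-- pv_equiv track=rewrite | github.com/IssacWD/myPythonCode | csc1002/test_prime_algorithm.py | algorithm_Eratosthenes
-- ===== SOURCE A (Python) =====
-- def algorithm_Eratosthenes(max_number):
--     if max_number < 2:
--         return [], 0
--     list_of_number = [i for i in range(3, max_number, 2)]
--     for number in list_of_number:
--         for i in range(2, max_number // number):
--             try:
--                 list_of_number.remove(number * i)
--             except ValueError:
--                 continue
--     return list_of_number, len(list_of_number)
-- ===== SOURCE B (Python) =====
-- def algorithm_Eratosthenes(max_number):
--     if max_number < 2:
--         return [], 0
--     dead = set()
--     for n in range(3, max_number, 2):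
--         if n not in dead:
--             for i in range(2, max_number // n):
--                 dead.add(n * i)
--     result = [n for n in range(3, max_number, 2) if n not in dead]
--     return result, len(result)
-- ===== Notes on version B (the rewrite author's own statement) =====
-- stated objective: faster
-- what changed: Replaces A's repeated list.remove scans over the list it is iterating (and mutating) with a single marking sieve: a set of struck numbers is built in one pass over the odd range and survivors are read off by one filter, reproducing A's exact (truncated) strike range for each surviving number.
import Mathlib
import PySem

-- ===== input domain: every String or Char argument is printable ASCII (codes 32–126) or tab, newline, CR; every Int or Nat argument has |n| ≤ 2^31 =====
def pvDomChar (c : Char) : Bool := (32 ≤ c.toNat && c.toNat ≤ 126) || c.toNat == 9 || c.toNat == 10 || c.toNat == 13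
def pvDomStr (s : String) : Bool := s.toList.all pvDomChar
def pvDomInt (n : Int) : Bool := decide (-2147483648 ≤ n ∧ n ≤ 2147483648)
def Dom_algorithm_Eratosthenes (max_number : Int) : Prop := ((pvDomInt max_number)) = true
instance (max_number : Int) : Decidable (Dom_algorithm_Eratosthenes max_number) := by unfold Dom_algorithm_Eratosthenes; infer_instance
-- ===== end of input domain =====

-- B replaces A's quadratic remove-from-the-list-being-iterated sieve by a marking sieve over a
-- set of struck ("dead") numbers; measurably faster, same return value everywhere.


-- ===== PORT A =====
-- inner loop: for i in range(2, max_number // number): try remove(number*i) except ValueError: continue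
def pvStrike (max_number n : Int) (cur : List Int) : List Int :=
  (PySem.List.pyRange 2 (PySem.Int.floordiv max_number n) 1).foldl
    (fun l i => match PySem.List.remove? l (n * i) with
      | some l' => l'
      | none => l) cur

-- one remove step never lengthens the list (needed by pvLoopA's termination measure)
theorem pvRemoveStep_le (l : List Int) (v : Int) :
    (match PySem.List.remove? l v with
      | some l' => l'
      | none => l).length ≤ l.length := by
  by_cases h : v ∈ l
  · rw [PySem.List.remove?_eq_some_erase l v h]
    exact List.length_erase_le
  · rw [(PySem.List.remove?_eq_none_iff l v).mpr h]

theorem pvStrike_length_le (max_number n : Int) (cur : List Int) :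
    (pvStrike max_number n cur).length ≤ cur.length := by
  unfold pvStrike
  generalize PySem.List.pyRange 2 (PySem.Int.floordiv max_number n) 1 = L
  induction L generalizing cur with
  | nil => simp
  | cons v vs ih =>
      simp only [List.foldl_cons]
      exact le_trans (ih _) (pvRemoveStep_le cur (n * v))

-- CPython's `for number in list_of_number` over the list it mutates: an internal index,
-- re-checked against the CURRENT length each iteration
def pvLoopA (max_number : Int) (cur : List Int) (idx : Nat) : List Int :=
  if h : idx < cur.length then
    pvLoopA max_number (pvStrike max_number cur[idx] cur) (idx + 1)
  else cur
termination_by cur.length - idx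
decreasing_by
  have := pvStrike_length_le max_number cur[idx] cur
  omega

def algorithm_Eratosthenes (max_number : Int) : List Int × Int :=
  if max_number < 2 then ([], 0)
  else
    let res := pvLoopA max_number (PySem.List.pyRange 3 max_number 2) 0
    (res, (res.length : Int))

-- ===== PORT B =====
-- inner loop: for i in range(2, max_number // n): dead.add(n * i)
def pvStrikeSet (max_number n : Int) (dead : PySem.Set Int) : PySem.Set Int :=
  (PySem.List.pyRange 2 (PySem.Int.floordiv max_number n) 1).foldl
    (fun d i => PySem.Set.add d (n * i)) dead

-- body of `for n in range(3, max_number, 2): if n not in dead: …`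
def pvStepB (max_number : Int) (dead : PySem.Set Int) (n : Int) : PySem.Set Int :=
  if PySem.Set.contains dead n then dead else pvStrikeSet max_number n dead

def algorithm_Eratosthenes_alt (max_number : Int) : List Int × Int :=
  if max_number < 2 then ([], 0)
  else
    let dead := (PySem.List.pyRange 3 max_number 2).foldl (pvStepB max_number) PySem.Set.empty
    let result := (PySem.List.pyRange 3 max_number 2).filter
      (fun n => !(PySem.Set.contains dead n))
    (result, (result.length : Int))

-- ===== PRECONDITION & SPEC =====
def Spec_algorithm_Eratosthenes (max_number : Int) (out : List Int × Int) : Prop := out = algorithm_Eratosthenes_alt max_number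
instance (max_number : Int) (out : List Int × Int) : Decidable (Spec_algorithm_Eratosthenes max_number out) := by unfold Spec_algorithm_Eratosthenes; infer_instance

-- ===== CLAIM (what is proved, stated in full; the proofs are below) =====
def Claim_equal_algorithm_Eratosthenes : Prop := ∀ (max_number : Int), Dom_algorithm_Eratosthenes max_number → Spec_algorithm_Eratosthenes max_number (algorithm_Eratosthenes max_number)

-- ===== LEMMAS AND PROOFS =====

-- the list of values A's inner loop tries to remove for the current number n
def pvStrikes (max_number n : Int) : List Int :=
  (PySem.List.pyRange 2 (PySem.Int.floordiv max_number n) 1).map (fun i => n * i)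

-- folding remove? (multiples of n, in order) over a nodup list deletes exactly those values
theorem foldl_remove_eq_filter (n : Int) (is : List Int) : ∀ (cur : List Int), cur.Nodup →
    is.foldl (fun l i => match PySem.List.remove? l (n * i) with
      | some l' => l'
      | none => l) cur
    = cur.filter (fun x => !((is.map (fun i => n * i)).contains x)) := by
  induction is with
  | nil => intro cur _; simp
  | cons i is ih =>
      intro cur hnd
      have hstep : (match PySem.List.remove? cur (n * i) with
          | some l' => l'
          | none => cur) = cur.filter (fun x => x != n * i) := by
        by_cases hv : (n * i) ∈ cur
        · simp only [PySem.List.remove?_eq_some_erase cur _ hv]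
          exact hnd.erase_eq_filter _
        · simp only [(PySem.List.remove?_eq_none_iff cur _).mpr hv]
          exact (List.filter_eq_self.mpr (fun a ha => by
            simp only [bne_iff_ne, ne_eq]
            exact fun h => hv (h ▸ ha))).symm
      rw [List.foldl_cons, hstep, ih _ (hnd.filter _), List.filter_filter]
      apply List.filter_congr
      intro x _
      by_cases hx : x = n * i <;> simp [hx, Bool.and_comm]

theorem pvStrike_eq_filter (max_number n : Int) (cur : List Int) (h : cur.Nodup) :
    pvStrike max_number n cur
      = cur.filter (fun x => !((pvStrikes max_number n).contains x)) := by
  unfold pvStrike pvStrikes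
  exact foldl_remove_eq_filter n _ cur h

theorem mem_pvStrikeSet (max_number n x : Int) (dead : PySem.Set Int) :
    x ∈ pvStrikeSet max_number n dead ↔ x ∈ dead ∨ x ∈ pvStrikes max_number n := by
  unfold pvStrikeSet pvStrikes
  generalize PySem.List.pyRange 2 (PySem.Int.floordiv max_number n) 1 = L
  induction L generalizing dead with
  | nil => simp
  | cons i L ih =>
      simp only [List.foldl_cons, List.map_cons, List.mem_cons]
      rw [ih]
      simp only [PySem.Set.mem_add]
      tauto

theorem mem_pvStrikes_ge (max_number n x : Int) (hn : 3 ≤ n)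
    (hx : x ∈ pvStrikes max_number n) : 2 * n ≤ x := by
  unfold pvStrikes at hx
  obtain ⟨i, hi, rfl⟩ := List.mem_map.mp hx
  have h2 : 2 ≤ i := (PySem.List.mem_pyRange_one.mp hi).1
  nlinarith

theorem mem_foldl_stepB_of_mem (max_number : Int) (rest : List Int) :
    ∀ (dead : PySem.Set Int) (x : Int), x ∈ dead →
      x ∈ rest.foldl (pvStepB max_number) dead := by
  induction rest with
  | nil => intro dead x hx; simpa using hx
  | cons y rest ih =>
      intro dead x hx
      simp only [List.foldl_cons]
      apply ih
      unfold pvStepB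
      split
      · exact hx
      · exact (mem_pvStrikeSet max_number y x dead).mpr (Or.inl hx)

theorem not_mem_foldl_stepB (max_number : Int) (rest : List Int) :
    ∀ (dead : PySem.Set Int) (x : Int), x ∉ dead →
      (∀ y ∈ rest, x < y ∧ 3 ≤ y) →
      x ∉ rest.foldl (pvStepB max_number) dead := by
  induction rest with
  | nil => intro dead x hx _; simpa using hx
  | cons y rest ih =>
      intro dead x hx hb
      simp only [List.foldl_cons]
      apply ih
      · unfold pvStepB
        split
        · exact hx
        · intro hmem
          rcases (mem_pvStrikeSet max_number y x dead).mp hmem with h | h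
          · exact hx h
          · have := mem_pvStrikes_ge max_number y x (hb y (by simp)).2 h
            have := (hb y (by simp)).1
            have := (hb y (by simp)).2
            omega
      · intro z hz; exact hb z (by simp [hz])

-- the simulation invariant: A's index loop on the live list equals B's marking loop
theorem pvSim (max_number : Int) : ∀ (rest done : List Int) (dead : PySem.Set Int),
    (done ++ rest).Pairwise (· < ·) →
    (∀ x ∈ done ++ rest, 3 ≤ x) →
    pvLoopA max_number (done ++ rest.filter (fun x => !(PySem.Set.contains dead x))) done.length
      = done ++ rest.filter
          (fun x => !(PySem.Set.contains (rest.foldl (pvStepB max_number) dead) x)) := by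
  intro rest
  induction rest with
  | nil =>
      intro done dead _ _
      rw [pvLoopA]
      simp
  | cons n rest ih =>
      intro done dead hpw hb
      have hsub : (done ++ rest).Sublist (done ++ n :: rest) :=
        (List.sublist_cons_self n rest).append_left done
      have h3n : 3 ≤ n := hb n (by simp)
      have hlt_done : ∀ d ∈ done, d < n := by
        intro d hd
        exact (List.pairwise_append.mp hpw).2.2 d hd n (by simp)
      have hlt_rest : ∀ y ∈ rest, n < y := by
        have := (List.pairwise_append.mp hpw).2.1
        exact (List.pairwise_cons.mp this).1
      by_cases hdead : PySem.Set.contains dead n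
      · -- n was already struck: A's list does not contain it, B skips it
        have hmem : n ∈ dead := (PySem.Set.contains_iff dead n).mp hdead
        have hstep : pvStepB max_number dead n = dead := by
          unfold pvStepB; rw [if_pos hdead]
        have hF : PySem.Set.contains (rest.foldl (pvStepB max_number) dead) n = true :=
          (PySem.Set.contains_iff _ n).mpr (mem_foldl_stepB_of_mem max_number rest dead n hmem)
        have h1 : (n :: rest).filter (fun x => !(PySem.Set.contains dead x))
            = rest.filter (fun x => !(PySem.Set.contains dead x)) := by
          simp [hmem]
        have h2 : (n :: rest).filter
              (fun x => !(PySem.Set.contains (rest.foldl (pvStepB max_number) dead) x))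
            = rest.filter
              (fun x => !(PySem.Set.contains (rest.foldl (pvStepB max_number) dead) x)) := by
          simp [mem_foldl_stepB_of_mem max_number rest dead n hmem]
        rw [List.foldl_cons, hstep, h1, h2]
        exact ih done dead (List.Pairwise.sublist hsub hpw) (fun x hx => hb x (hsub.subset hx))
      · -- n is alive: A visits it and strikes its multiples; B strikes the same set
        have hnmem : n ∉ dead := fun h => hdead ((PySem.Set.contains_iff dead n).mpr h)
        have hnM : n ∉ pvStrikes max_number n := by
          intro h
          have := mem_pvStrikes_ge max_number n n h3n h
          omega
        have h1 : (n :: rest).filter (fun x => !(PySem.Set.contains dead x))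
            = n :: rest.filter (fun x => !(PySem.Set.contains dead x)) := by
          simp [hnmem]
        rw [h1]
        have hnd0 : (done ++ n :: rest).Nodup := hpw.imp (fun h => ne_of_lt h)
        have hsubf : (done ++ n :: rest.filter (fun x => !(PySem.Set.contains dead x))).Sublist
            (done ++ n :: rest) :=
          ((List.Sublist.cons₂ n List.filter_sublist).append_left done)
        have hnd : (done ++ n :: rest.filter (fun x => !(PySem.Set.contains dead x))).Nodup :=
          hnd0.sublist hsubf
        have hlen : done.length
            < (done ++ n :: rest.filter (fun x => !(PySem.Set.contains dead x))).length := by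
          simp [List.length_append]
        rw [pvLoopA, dif_pos hlen]
        have hget : (done ++ n :: rest.filter (fun x => !(PySem.Set.contains dead x)))[done.length]'hlen
            = n := by
          rw [List.getElem_append_right (le_refl done.length)]
          simp
        rw [hget, pvStrike_eq_filter max_number n _ hnd]
        -- compute the filtered list: done and n survive, the tail gets the union filter
        have hfa : done.filter (fun x => !((pvStrikes max_number n).contains x)) = done := by
          refine List.filter_eq_self.mpr ?_
          intro d hd
          have : d ∉ pvStrikes max_number n := by
            intro h
            have := mem_pvStrikes_ge max_number n d h3n h
            have := hlt_done d hd
            omega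
          simpa using this
        have hgn : (!((pvStrikes max_number n).contains n)) = true := by simpa using hnM
        have hff : (rest.filter (fun x => !(PySem.Set.contains dead x))).filter
              (fun x => !((pvStrikes max_number n).contains x))
            = rest.filter (fun x => !(PySem.Set.contains (pvStrikeSet max_number n dead) x)) := by
          rw [List.filter_filter]
          refine List.filter_congr ?_
          intro x _
          have hms := mem_pvStrikeSet max_number n x dead
          by_cases hx1 : x ∈ dead <;> by_cases hx2 : x ∈ pvStrikes max_number n <;>
            simp [hx1, hx2, hms]
        have hfilter : (done ++ n :: rest.filter (fun x => !(PySem.Set.contains dead x))).filter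
              (fun x => !((pvStrikes max_number n).contains x))
            = (done ++ [n]) ++ rest.filter
                (fun x => !(PySem.Set.contains (pvStrikeSet max_number n dead) x)) := by
          rw [List.filter_append, hfa, List.filter_cons, if_pos hgn, hff]
          simp
        rw [hfilter]
        have hlen1 : done.length + 1 = (done ++ [n]).length := by simp
        rw [hlen1]
        have hpw' : ((done ++ [n]) ++ rest).Pairwise (· < ·) := by
          simpa [List.append_assoc] using hpw
        have hb' : ∀ x ∈ (done ++ [n]) ++ rest, 3 ≤ x := by
          intro x hx
          apply hb
          simpa [List.append_assoc] using hx
        rw [ih (done ++ [n]) (pvStrikeSet max_number n dead) hpw' hb']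
        -- fold B one step and re-attach n, which no later strike can hit
        have hstep : pvStepB max_number dead n = pvStrikeSet max_number n dead := by
          unfold pvStepB; rw [if_neg hdead]
        have hq : n ∉ rest.foldl (pvStepB max_number) (pvStrikeSet max_number n dead) := by
          apply not_mem_foldl_stepB
          · intro h
            rcases (mem_pvStrikeSet max_number n n dead).mp h with h | h
            · exact hnmem h
            · exact hnM h
          · intro y hy
            exact ⟨hlt_rest y hy, hb y (by simp [hy])⟩
        have h2 : (n :: rest).filter
              (fun x => !(PySem.Set.contains ((n :: rest).foldl (pvStepB max_number) dead) x))
            = n :: rest.filter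
              (fun x => !(PySem.Set.contains
                (rest.foldl (pvStepB max_number) (pvStrikeSet max_number n dead)) x)) := by
          rw [List.foldl_cons, hstep, List.filter_cons, if_pos (by simp [hq])]
        rw [h2]
        simp [List.append_assoc]

-- ===== VERDICT (by name: the statement is the Claim_ definition above) =====
theorem algorithm_Eratosthenes_spec : Claim_equal_algorithm_Eratosthenes := by
  intro m _
  unfold Spec_algorithm_Eratosthenes algorithm_Eratosthenes algorithm_Eratosthenes_alt
  by_cases h : m < 2
  · simp [h]
  · simp only [h, if_false]
    have hpw : (PySem.List.pyRange 3 m 2).Pairwise (· < ·) := by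
      rw [PySem.List.pyRange_of_pos 3 m (by norm_num)]
      refine List.pairwise_map.mpr (List.pairwise_lt_range.imp ?_)
      intro a b hab
      omega
    have hb : ∀ x ∈ PySem.List.pyRange 3 m 2, 3 ≤ x := fun x hx =>
      ((PySem.List.mem_pyRange_iff_of_pos (by norm_num) x).mp hx).1
    have hsim := pvSim m (PySem.List.pyRange 3 m 2) [] PySem.Set.empty
      (by simpa using hpw) (by simpa using hb)
    have hempty : (PySem.List.pyRange 3 m 2).filter
        (fun x => !(PySem.Set.contains PySem.Set.empty x)) = PySem.List.pyRange 3 m 2 := by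
      simp [PySem.Set.empty]
    rw [List.nil_append, List.length_nil, hempty, List.nil_append] at hsim
    rw [hsim]
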